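-- pv_equiv track=rewrite | github.com/vpapg/NLTK_book_py3 | Ch02/ex22.py | hedge
-- ===== SOURCE A (Python) =====
-- def hedge(text):
--     i=0
--     final = []
--     if type(text) is str:
--         text = text.split()
--     for w in text:
--         final.append(w)
--         if i==2:
--             final.append('like')
--             i=0
--         else:
--             i+=1
--     return ' '.join(final) # OR "return final" as a list
-- ===== SOURCE B (Python) =====
-- def hedge(text):
--     if type(text) is str:
--         text = text.split()
--     def go(ws):
--         if len(ws) < 3:
--             return list(ws)
--         a, b, c, *rest = ws
--         return [a, b, c, 'like'] + go(rest)
--     return ' '.join(go(list(text)))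
-- ===== Notes on version B (the rewrite author's own statement) =====
-- stated objective: alternative
-- what changed: Replaced the running mod-3 counter with a recursion that consumes the word list three words at a time, emitting the chunk plus 'like' whenever a full chunk of three exists.
import Mathlib
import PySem

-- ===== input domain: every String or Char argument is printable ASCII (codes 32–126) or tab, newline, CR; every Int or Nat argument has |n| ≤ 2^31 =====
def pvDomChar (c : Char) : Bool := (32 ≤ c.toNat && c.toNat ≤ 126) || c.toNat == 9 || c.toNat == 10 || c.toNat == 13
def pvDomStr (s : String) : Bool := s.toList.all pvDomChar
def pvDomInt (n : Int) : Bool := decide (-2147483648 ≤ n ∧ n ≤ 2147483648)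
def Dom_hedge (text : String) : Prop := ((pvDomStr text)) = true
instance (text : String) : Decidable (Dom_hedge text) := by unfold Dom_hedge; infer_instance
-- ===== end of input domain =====

-- B replaces the running mod-3 counter with a recursion consuming three words at a time (alternative decomposition, same cost).

-- ===== PORT A =====
-- the loop body: append the word; after every third word append 'like' and reset the counter
def hedgeStep (st : Int × List String) (w : String) : Int × List String :=
  let final := st.2 ++ [w]
  if st.1 == 2 then (0, final ++ ["like"]) else (st.1 + 1, final)

def hedge (text : String) : String :=
  PySem.Str.join " " ((PySem.Str.split₀ text).foldl hedgeStep (0, [])).2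

-- ===== PORT B =====
-- Source B's `go`: fewer than three words are returned as-is, else the first three plus 'like' then recurse
def hedgeGo : List String → List String
  | [] => []
  | [a] => [a]
  | [a, b] => [a, b]
  | a :: b :: c :: rest => a :: b :: c :: "like" :: hedgeGo rest

def hedge_alt (text : String) : String :=
  PySem.Str.join " " (hedgeGo (PySem.Str.split₀ text))

-- ===== PRECONDITION & SPEC =====
def Spec_hedge (text : String) (out : String) : Prop := out = hedge_alt text
instance (text : String) (out : String) : Decidable (Spec_hedge text out) := by unfold Spec_hedge; infer_instance

-- ===== CLAIM (what is proved, stated in full; the proofs are below) =====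
def Claim_equal_hedge : Prop := ∀ (text : String), Dom_hedge text → Spec_hedge text (hedge text)

-- ===== LEMMAS AND PROOFS =====
theorem hedge_loop (ws : List String) : ∀ acc : List String,
    (ws.foldl hedgeStep (0, acc)).2 = acc ++ hedgeGo ws := by
  induction ws using hedgeGo.induct with
  | case1 => intro acc; simp [hedgeGo]
  | case2 a => intro acc; simp [List.foldl, hedgeStep, hedgeGo]
  | case3 a b => intro acc; simp [List.foldl, hedgeStep, hedgeGo]
  | case4 a b c rest ih =>
      intro acc
      simp only [List.foldl, hedgeStep, hedgeGo]
      norm_num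
      rw [ih]
      simp

-- ===== VERDICT (by name: the statement is the Claim_ definition above) =====
theorem hedge_spec : Claim_equal_hedge := by
  intro text _
  unfold Spec_hedge hedge hedge_alt
  rw [hedge_loop]
  simp
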